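-- pv_equiv track=rewrite | github.com/teyandeymain1/01-python-codes | 01_codes/01_競プロ用/01_PythonCodesLibrary/名前変更予定handle_eq_with_3unks_func.py | handle_eq_with_3unks
-- ===== SOURCE A (Python) =====
-- def handle_eq_with_3unks(rcrsVal, varList, inputList):
--
--     Const = inputList[1]    #Constを代入
--
--     #-------------------以下に変数 X,Y,Z の変域(Range)を書く-------------------
--     varRng1 = inputList[0] #変数 X,Y,Z の変域は 0<=X<=varRng1, 0<=Y<=varRng1, 0<=Z<=varRng1 である。
--     maxYplusZ = 2*varRng1  #<-最大値を問題に応じて変更すること。今回は 0<=Y<=varRng1, 0<=Z<=varRng1 より 0<=Y+Z<=2varRng1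
--     #------------------------ここまで--------------------------------------
--
--     #-----------以下に操作に必要な変数を書く--------------
--     varList[0] = 0
--     #--------------------ここまで-----------------------
--
--     for X in range(varRng1 + 1):                   # (Y+Z)=(Const−X) として X の値を固定すると、Y と Z の二変数を考えるだけで済む。
--         if 0 <= (Const - X) <= maxYplusZ:
--             minY = max(0, ((Const - X) - varRng1)) # Y=0 のとき、Z=2varRng1 (Y = 0, minYの最小値)、Y=(Const-X)-varRng1 のとき Z=varRng1 (Y=varRng1, minYの最大値かつmaxYの最小値)
--             maxY = min(varRng1, (Const - X))       # Y=(Const-X) のとき Z=0 (Y=2varRng1, maxYの最大値)となる。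
--
--     #------------------関数内で行う操作を下記に書く(このプログラムはAtCoder ABC051-B_Sum of Three Integers用)-------------------
--             varList[0] += (maxY - minY + 1)    #取りうる Y の個数は maxY−minY+1 です。この式はminYからmaxYまでの数字の個数を数える式。
--                                                #例えば、minY=0,maxY=3 のとき、整数の個数は0から3までの4つ (maxY−minY+1=3-0+1=4) 。
--     #--------------------ここまで-----------------------
--
--     return varList
-- ===== SOURCE B (Python) =====
-- # B: O(1) closed form via inclusion-exclusion (triangular numbers) instead of A's O(varRng1) loop.
-- # Like A, mutates varList[0] in place and returns varList.
-- def handle_eq_with_3unks(rcrsVal, varList, inputList):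
--     R = inputList[0]
--     Const = inputList[1]
--
--     def tri(t):  # number of (y, z) >= 0 with y + z <= t
--         return (t + 1) * (t + 2) // 2 if t >= 0 else 0
--
--     if R < 0:
--         varList[0] = 0
--     else:
--         # inclusion-exclusion over the three upper bounds X,Y,Z <= R
--         varList[0] = (tri(Const)
--                       - 3 * tri(Const - (R + 1))
--                       + 3 * tri(Const - 2 * (R + 1))
--                       - tri(Const - 3 * (R + 1)))
--     return varList
-- ===== Notes on version B (the rewrite author's own statement) =====
-- stated objective: faster
-- what changed: Replaces the O(varRng1) loop over X with the O(1) inclusion-exclusion closed form (triangular numbers) for the number of triples in [0,R]^3 summing to Const.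
import Mathlib
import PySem

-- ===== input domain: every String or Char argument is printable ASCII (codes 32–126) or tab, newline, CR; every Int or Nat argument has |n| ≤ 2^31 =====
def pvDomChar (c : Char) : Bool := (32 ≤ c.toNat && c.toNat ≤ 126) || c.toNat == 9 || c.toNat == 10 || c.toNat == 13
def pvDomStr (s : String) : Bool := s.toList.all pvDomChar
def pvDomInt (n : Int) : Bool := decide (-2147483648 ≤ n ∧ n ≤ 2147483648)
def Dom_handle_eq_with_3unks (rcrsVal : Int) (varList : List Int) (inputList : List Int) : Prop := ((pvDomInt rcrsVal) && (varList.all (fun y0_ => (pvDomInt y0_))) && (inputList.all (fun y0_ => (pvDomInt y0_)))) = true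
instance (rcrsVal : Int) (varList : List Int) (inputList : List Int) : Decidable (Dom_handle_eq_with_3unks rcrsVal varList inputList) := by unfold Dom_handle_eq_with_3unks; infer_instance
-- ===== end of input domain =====

-- B replaces A's O(varRng1) loop by the O(1) inclusion-exclusion closed form; like the Python,
-- both write the count into varList[0] in place (the theorem is about the returned list).

-- ===== PORT A =====
-- literal port of A: Const = inputList[1], varRng1 = inputList[0], varList[0] = 0, then
-- for X in range(varRng1+1): if 0 <= Const-X <= 2*varRng1: varList[0] += maxY - minY + 1.
def handle_eq_with_3unks (rcrsVal : Int) (varList : List Int) (inputList : List Int) : List Int :=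
  match PySem.List.pyGet? inputList 1, PySem.List.pyGet? inputList 0 with
  | some Const, some varRng1 =>
    (PySem.List.pyRange 0 (varRng1 + 1) 1).foldl
      (fun l X =>
        if 0 ≤ Const - X ∧ Const - X ≤ 2 * varRng1 then
          -- minY = max(0, Const-X-varRng1), maxY = min(varRng1, Const-X); varList[0] += maxY-minY+1
          l.set 0 (PySem.List.pyGetD l 0 0 + (min varRng1 (Const - X) - max 0 (Const - X - varRng1) + 1))
        else l)
      (varList.set 0 0)                  -- varList[0] = 0  (IndexError on [] excluded by Pre_)
  | _, _ => []                           -- IndexError (excluded by Pre_)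

-- ===== PORT B =====
-- tri t = number of (y,z) ≥ 0 with y + z ≤ t  (Source B's helper, with Python's //)
def pvTri (t : Int) : Int := if 0 ≤ t then PySem.Int.floordiv ((t + 1) * (t + 2)) 2 else 0

def handle_eq_with_3unks_alt (rcrsVal : Int) (varList : List Int) (inputList : List Int) : List Int :=
  (((PySem.List.pyGet? inputList 0).bind (fun R =>
    (PySem.List.pyGet? inputList 1).map (fun Const =>
      if R < 0 then varList.set 0 0
      else varList.set 0 (pvTri Const - 3 * pvTri (Const - (R + 1))
            + 3 * pvTri (Const - 2 * (R + 1)) - pvTri (Const - 3 * (R + 1))))))).getD []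
  -- a none from pyGet? (IndexError, excluded by Pre_) yields []

-- ===== PRECONDITION & SPEC =====
-- Pre_ excludes exactly the inputs where Python A raises IndexError: inputList shorter than 2
-- (inputList[1]) or empty varList (varList[0] = 0).
def Pre_handle_eq_with_3unks (rcrsVal : Int) (varList : List Int) (inputList : List Int) : Prop :=
  2 ≤ inputList.length ∧ varList ≠ []
instance (rcrsVal : Int) (varList : List Int) (inputList : List Int) : Decidable (Pre_handle_eq_with_3unks rcrsVal varList inputList) := by unfold Pre_handle_eq_with_3unks; infer_instance

def pvWitness_handle_eq_with_3unks : Int × List Int × List Int := (0, [0], [2, 3])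

def Spec_handle_eq_with_3unks (rcrsVal : Int) (varList : List Int) (inputList : List Int) (out : List Int) : Prop := out = handle_eq_with_3unks_alt rcrsVal varList inputList
instance (rcrsVal : Int) (varList : List Int) (inputList : List Int) (out : List Int) : Decidable (Spec_handle_eq_with_3unks rcrsVal varList inputList out) := by unfold Spec_handle_eq_with_3unks; infer_instance

-- ===== CLAIM (what is proved, stated in full; the proofs are below) =====
def Claim_equal_handle_eq_with_3unks : Prop := ∀ (rcrsVal : Int) (varList : List Int) (inputList : List Int), Dom_handle_eq_with_3unks rcrsVal varList inputList → Pre_handle_eq_with_3unks rcrsVal varList inputList → Spec_handle_eq_with_3unks rcrsVal varList inputList (handle_eq_with_3unks rcrsVal varList inputList)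

-- ===== LEMMAS AND PROOFS =====

-- number of (y,z) ≥ 0 with y + z = t
def pvLin (t : Int) : Int := if 0 ≤ t then t + 1 else 0

lemma pvTri_step (t : Int) : pvTri t = pvTri (t - 1) + pvLin t := by
  rcases lt_trichotomy t 0 with h | h | h
  · unfold pvTri pvLin
    rw [if_neg (by omega), if_neg (by omega), if_neg (by omega)]
    ring
  · subst h; decide
  · obtain ⟨m, hm⟩ : (2 : Int) ∣ t * t + t := by
      obtain ⟨m, hm⟩ := Int.even_mul_succ_self t
      exact ⟨m, by linarith [hm]⟩
    unfold pvTri pvLin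
    rw [if_pos (by omega), if_pos (by omega), if_pos (by omega),
      PySem.Int.floordiv_eq_ediv_of_pos (by norm_num),
      PySem.Int.floordiv_eq_ediv_of_pos (by norm_num)]
    have e1 : (t + 1) * (t + 2) = (t * t + t) + (2 * t + 2) := by ring
    have e2 : (t - 1 + 1) * (t - 1 + 2) = t * t + t := by ring
    rw [e1, e2, hm]
    omega

-- the per-X contribution of A's loop equals a signed combination of pvLin's
lemma pvTerm_eq (r s : Int) (hr : 0 ≤ r) :
    (if 0 ≤ s ∧ s ≤ 2 * r then (min r s - max 0 (s - r) + 1) else 0)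
    = pvLin s - 2 * pvLin (s - (r + 1)) + pvLin (s - 2 * (r + 1)) := by
  unfold pvLin
  simp only [min_def, max_def]
  split_ifs <;> omega

-- A's in-place update of varList[0] is a pure accumulator
lemma pvFold_set (xs : List Int) (p : Int → Prop) [DecidablePred p] (d : Int → Int)
    (varList : List Int) (h : varList ≠ []) (a : Int) :
    xs.foldl (fun l X => if p X then l.set 0 (PySem.List.pyGetD l 0 0 + d X) else l) (varList.set 0 a)
    = varList.set 0 (xs.foldl (fun acc X => if p X then acc + d X else acc) a) := by
  induction xs generalizing a with
  | nil => rfl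
  | cons x t ih =>
    cases varList with
    | nil => exact absurd rfl h
    | cons v vt =>
      simp only [List.foldl_cons]
      by_cases hp : p x
      · simp only [hp, if_pos, List.set]
        have : PySem.List.pyGetD (a :: vt) 0 0 = a := by
          simp [PySem.List.pyGetD, PySem.List.pyGet?, PySem.List.pyIdx?]
        rw [this]
        exact ih (a + d x)
      · simp only [hp, if_neg, not_false_iff]
        exact ih a

-- summing the pvLin combination over X = 0 .. n-1 telescopes into pvTri's
lemma pvSum_range (r : Int) : ∀ (n : Nat) (c : Int),
    (List.range n).foldl
      (fun (acc : Int) (k : Nat) =>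
        acc + (pvLin (c - (k : Int)) - 2 * pvLin (c - (k : Int) - (r + 1))
          + pvLin (c - (k : Int) - 2 * (r + 1)))) 0
    = (pvTri c - pvTri (c - n)) - 2 * (pvTri (c - (r + 1)) - pvTri (c - (r + 1) - n))
      + (pvTri (c - 2 * (r + 1)) - pvTri (c - 2 * (r + 1) - n)) := by
  intro n
  induction n with
  | zero => intro c; simp
  | succ n ih =>
    intro c
    rw [List.range_succ, List.foldl_append]
    simp only [List.foldl_cons, List.foldl_nil]
    rw [ih c]
    have h1 := pvTri_step (c - n)
    have h2 := pvTri_step (c - (r + 1) - n)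
    have h3 := pvTri_step (c - 2 * (r + 1) - n)
    push_cast
    ring_nf
    ring_nf at h1 h2 h3
    linarith

-- ===== VERDICT (by name: the statement is the Claim_ definition above) =====
theorem handle_eq_with_3unks_spec : Claim_equal_handle_eq_with_3unks := by
  intro rcrsVal varList inputList _ hpre
  obtain ⟨hlen, hvl⟩ := hpre
  unfold Spec_handle_eq_with_3unks
  match inputList, hlen with
  | i0 :: i1 :: rest, _ =>
    have hg0 : PySem.List.pyGet? (i0 :: i1 :: rest) 0 = some i0 := by
      unfold PySem.List.pyGet? PySem.List.pyIdx?
      simp only [List.length_cons]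
      rw [if_pos (by omega), if_pos (by omega)]
      simp
    have hg1 : PySem.List.pyGet? (i0 :: i1 :: rest) 1 = some i1 := by
      unfold PySem.List.pyGet? PySem.List.pyIdx?
      simp only [List.length_cons]
      rw [if_pos (by omega), if_pos (by omega)]
      simp
    unfold handle_eq_with_3unks handle_eq_with_3unks_alt
    rw [hg0, hg1]
    simp only [Option.bind_some, Option.map_some, Option.getD_some]
    by_cases hr : i0 < 0
    · -- empty range: A returns varList.set 0 0, B takes its R < 0 branch
      have hempty : PySem.List.pyRange 0 (i0 + 1) 1 = [] := by
        rw [PySem.List.pyRange_one]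
        have : (i0 + 1 - 0).toNat = 0 := by omega
        rw [this]; rfl
      rw [hempty, if_pos hr]
      rfl
    · have hr' : 0 ≤ i0 := by omega
      rw [if_neg hr]
      rw [pvFold_set _ _ _ _ hvl]
      congr 1
      rw [PySem.List.pyRange_one, List.foldl_map]
      have hfun : (fun (acc : Int) (k : Nat) =>
            if 0 ≤ i1 - (0 + (k : Int)) ∧ i1 - (0 + (k : Int)) ≤ 2 * i0 then
              acc + (min i0 (i1 - (0 + (k : Int))) - max 0 (i1 - (0 + (k : Int)) - i0) + 1)
            else acc)
          = (fun (acc : Int) (k : Nat) =>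
              acc + (pvLin (i1 - (k : Int)) - 2 * pvLin (i1 - (k : Int) - (i0 + 1))
                + pvLin (i1 - (k : Int) - 2 * (i0 + 1)))) := by
        funext acc k
        have h := pvTerm_eq i0 (i1 - (k : Int)) hr'
        simp only [zero_add]
        split_ifs at h ⊢ <;> linarith
      rw [hfun, pvSum_range i0 ((i0 + 1 - 0).toNat) i1]
      have hn : (((i0 + 1 - 0).toNat : Int)) = i0 + 1 := by omega
      rw [hn]
      have e1 : i1 - (i0 + 1) - (i0 + 1) = i1 - 2 * (i0 + 1) := by ring
      have e2 : i1 - 2 * (i0 + 1) - (i0 + 1) = i1 - 3 * (i0 + 1) := by ring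
      rw [e1, e2]
      ring
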